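-- pv_equiv track=rewrite | github.com/Varun-Jethani/KU-workshop | replacevow.py | replaceV
-- ===== SOURCE A (Python) =====
-- def replaceV(x):
--     V="aeiouAEIOU"
--     vc=0
--     l=''
--     n=''
--     for i in range(len(x)):
--         if x[i] in V:
--             vc+=1
--             l+=x[i]
--         else:
--             vc=0
--             n+=l
--             n+=x[i]
--             l=''
--         if vc==3:
--             l=''
--             n+='_'
--             vc=0
--     n+=l
--     return n
-- ===== SOURCE B (Python) =====
-- def replaceV(x):
--     V = "aeiouAEIOU"
--     out = []
--     i = 0
--     n = len(x)
--     while i < n: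
--         if x[i] in V:
--             j = i
--             while j < n and x[j] in V:
--                 j += 1
--             L = j - i
--             out.append('_' * (L // 3))
--             out.append(x[i + (L // 3) * 3:j])
--             i = j
--         else:
--             out.append(x[i])
--             i += 1
--     return ''.join(out)
-- ===== Notes on version B (the rewrite author's own statement) =====
-- stated objective: alternative
-- what changed: B scans the string grouping maximal vowel runs and, per run of length L, emits L//3 underscores followed by the last L%3 vowels in closed form, replacing A's per-character vowel-counter with pending-buffer flushing.
import Mathlib
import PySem

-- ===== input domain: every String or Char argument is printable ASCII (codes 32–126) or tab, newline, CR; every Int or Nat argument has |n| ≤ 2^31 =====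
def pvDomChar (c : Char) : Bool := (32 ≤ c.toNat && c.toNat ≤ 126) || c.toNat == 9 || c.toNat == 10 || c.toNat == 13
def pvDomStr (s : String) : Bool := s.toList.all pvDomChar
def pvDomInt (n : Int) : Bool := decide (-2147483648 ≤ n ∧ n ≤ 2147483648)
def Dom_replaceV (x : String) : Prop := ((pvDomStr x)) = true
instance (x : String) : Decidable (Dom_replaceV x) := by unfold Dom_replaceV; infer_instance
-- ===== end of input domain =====

-- B groups maximal vowel runs and emits underscores per run in closed form instead of A's per-character counter; equal return values on all inputs (alternative decomposition, no speed claim).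
def pyVowels : List Char := ['a','e','i','o','u','A','E','I','O','U']

-- ===== PORT A =====
-- Port of A: per-character fold carrying (vc, pending vowel buffer l, output n), final n ++ l.
def stepA (s : Nat × List Char × List Char) (c : Char) : Nat × List Char × List Char :=
  if c ∈ pyVowels then
    let vc := s.1 + 1
    let l := s.2.1 ++ [c]
    if vc == 3 then (0, [], s.2.2 ++ ['_']) else (vc, l, s.2.2)
  else (0, [], s.2.2 ++ s.2.1 ++ [c])

def replaceV (x : String) : String :=
  let s := x.toList.foldl stepA (0, [], [])
  String.ofList (s.2.2 ++ s.2.1)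

-- ===== PORT B =====
-- Port of B: group maximal vowel runs; each run of length L becomes '_'*(L/3) ++ its last L%3 chars.
def vowelB (c : Char) : Bool := decide (c ∈ pyVowels)

def altGo : List Char → List Char
  | [] => []
  | c :: rest =>
    if vowelB c then
      let run := List.takeWhile vowelB (c :: rest)
      List.replicate (run.length / 3) '_' ++ run.drop (run.length / 3 * 3)
        ++ altGo (List.dropWhile vowelB (c :: rest))
    else c :: altGo rest
termination_by l => l.length
decreasing_by
  · simp only [List.dropWhile_cons, *, if_pos]
    exact Nat.lt_succ_of_le (List.length_dropWhile_le _ _)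
  · simp

def replaceV_alt (x : String) : String := String.ofList (altGo x.toList)

-- ===== PRECONDITION & SPEC =====
def Spec_replaceV (x : String) (out : String) : Prop := out = replaceV_alt x
instance (x : String) (out : String) : Decidable (Spec_replaceV x out) := by unfold Spec_replaceV; infer_instance

-- ===== CLAIM (what is proved, stated in full; the proofs are below) =====
def Claim_equal_replaceV : Prop := ∀ (x : String), Dom_replaceV x → Spec_replaceV x (replaceV x)

-- ===== LEMMAS AND PROOFS =====

-- ===== VERDICT (by name: the statement is the Claim_ definition above) =====
lemma vowel_iff (c : Char) : c ∈ pyVowels ↔ vowelB c = true := by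
  simp [pyVowels, pyVowels, vowelB]

lemma run_lemma : ∀ (r : List Char), (∀ c ∈ r, vowelB c = true) →
    ∀ (vc : Nat) (l n : List Char), vc = l.length → vc < 3 →
    List.foldl stepA (vc, l, n) r =
      ((vc + r.length) % 3, (l ++ r).drop ((vc + r.length) / 3 * 3),
        n ++ List.replicate ((vc + r.length) / 3) '_') := by
  intro r
  induction r with
  | nil =>
    intro _ vc l n hvc h3
    simp [Nat.mod_eq_of_lt h3, Nat.div_eq_of_lt h3]
  | cons c r' ih =>
    intro hall vc l n hvc h3
    have hc : vowelB c = true := hall c (List.mem_cons_self ..)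
    have hmem : c ∈ pyVowels := (vowel_iff c).2 hc
    simp only [List.foldl_cons]
    by_cases h2 : vc = 2
    · subst h2
      have hl3 : (l ++ [c]).length = 3 := by simp [← hvc]
      have hstep : stepA (2, l, n) c = (0, [], n ++ ['_']) := by
        simp [stepA, hmem]
      rw [hstep, ih (fun a ha => hall a (List.mem_cons_of_mem _ ha)) 0 [] (n ++ ['_']) rfl
        (by omega)]
      refine Prod.ext ?_ (Prod.ext ?_ ?_)
      · simp; omega
      · simp only [List.nil_append, Nat.zero_add, List.length_cons]
        have hq : (2 + (r'.length + 1)) / 3 * 3 = 3 + r'.length / 3 * 3 := by omega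
        rw [hq, List.append_cons l c r', ← List.drop_drop, List.drop_left' hl3]
      · simp only [List.length_cons]
        have hq : (2 + (r'.length + 1)) / 3 = r'.length / 3 + 1 := by omega
        rw [hq, List.replicate_succ]
        simp
    · have hstep : stepA (vc, l, n) c = (vc + 1, l ++ [c], n) := by
        simp [stepA, hmem, h2]
      rw [hstep, ih (fun a ha => hall a (List.mem_cons_of_mem _ ha)) (vc + 1) (l ++ [c]) n
        (by simp [hvc]) (by omega)]
      simp only [← List.append_cons, List.length_cons]
      have hq : vc + 1 + r'.length = vc + (r'.length + 1) := by omega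
      rw [hq]

lemma main_lemma : ∀ (k : Nat) (xs : List Char), xs.length ≤ k → ∀ n : List Char,
    (List.foldl stepA (0, [], n) xs).2.2 ++ (List.foldl stepA (0, [], n) xs).2.1
      = n ++ altGo xs := by
  intro k
  induction k with
  | zero =>
    intro xs hx n
    have hnil : xs = [] := by cases xs <;> simp_all
    subst hnil
    simp [altGo]
  | succ k ih =>
    intro xs hx n
    cases xs with
    | nil => simp [altGo]
    | cons c rest =>
      by_cases hc : vowelB c = true
      · have hsplit : List.takeWhile vowelB (c :: rest) ++ List.dropWhile vowelB (c :: rest)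
            = c :: rest := List.takeWhile_append_dropWhile
        set run := List.takeWhile vowelB (c :: rest) with hrun
        set rest' := List.dropWhile vowelB (c :: rest) with hrest'
        have hall : ∀ a ∈ run, vowelB a = true := by
          intro a ha
          exact (List.all_eq_true.mp (List.all_takeWhile (p := vowelB) (l := c :: rest))) a ha
        have hrunlen : 1 ≤ run.length := by
          rw [hrun]
          simp [hc]
        have hfold : List.foldl stepA (0, [], n) (c :: rest) =
            List.foldl stepA (run.length % 3, run.drop (run.length / 3 * 3),
              n ++ List.replicate (run.length / 3) '_') rest' := by
          rw [← hsplit, List.foldl_append, run_lemma run hall 0 [] n rfl (by omega)]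
          simp
        have haltgo : altGo (c :: rest) = List.replicate (run.length / 3) '_' ++
            run.drop (run.length / 3 * 3) ++ altGo rest' := by
          rw [altGo]
          simp only [hc, if_true]
          rw [← hrun, ← hrest']
        rw [hfold, haltgo]
        cases hre : rest' with
        | nil => simp [altGo]
        | cons d rest'' =>
          have hd : vowelB d = false := by
            have h := List.head?_dropWhile_not vowelB (c :: rest)
            rw [← hrest', hre] at h
            simpa using h
          have hdm : d ∉ pyVowels := fun hm => by
            rw [(vowel_iff d).1 hm] at hd
            exact Bool.noConfusion hd
          have hlen : rest''.length ≤ k := by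
            have hlensplit := congrArg List.length hsplit
            rw [hre] at hlensplit
            simp at hlensplit hx
            omega
          simp only [List.foldl_cons]
          have hstep : stepA (run.length % 3, run.drop (run.length / 3 * 3),
              n ++ List.replicate (run.length / 3) '_') d =
              (0, [], n ++ List.replicate (run.length / 3) '_' ++
                run.drop (run.length / 3 * 3) ++ [d]) := by
            simp [stepA, hdm]
          rw [hstep, ih rest'' hlen]
          rw [altGo]
          simp [hd, List.append_assoc]
      · have hmem : c ∉ pyVowels := fun hm => hc ((vowel_iff c).1 hm)
        simp only [List.foldl_cons]
        have hstep : stepA (0, [], n) c = (0, [], n ++ [c]) := by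
          simp [stepA, hmem]
        rw [hstep, ih rest (by simpa using hx) (n ++ [c])]
        rw [altGo]
        simp [hc]

theorem replaceV_spec : Claim_equal_replaceV := by
  intro x _
  unfold Spec_replaceV replaceV replaceV_alt
  have h := main_lemma x.toList.length x.toList le_rfl []
  simp at h
  simp [h]
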